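-- pv_equiv track=rewrite | github.com/mayurifalke/Finalyearproject1 | py-backend/main.py | sanitize_mongo_name
-- ===== SOURCE A (Python) =====
-- def sanitize_mongo_name(name: str) -> str:
--     """
--     Sanitize MongoDB database/collection names by replacing invalid characters.
--     MongoDB names cannot contain: '.', ' ', '/', '\\', or null character.
--     """
--     if not name:
--         return name
--     # Replace invalid characters with underscore
--     invalid_chars = ['.', ' ', '/', '\\', '\x00']
--     sanitized = name
--     for char in invalid_chars:
--         sanitized = sanitized.replace(char, '_')
--     # Remove leading/trailing underscores and ensure it's not empty
--     sanitized = sanitized.strip('_')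
--     if not sanitized:
--         sanitized = "default"
--     return sanitized
-- ===== SOURCE B (Python) =====
-- INVALID_CHARS = frozenset({'.', ' ', '/', '\\', '\x00'})
--
-- def sanitize_mongo_name(name: str) -> str:
--     """Single pass: map each invalid character to '_', then trim underscores
--     from both ends with explicit pops, defaulting to "default" if nothing is left."""
--     if not name:
--         return name
--     out = ['_' if c in INVALID_CHARS else c for c in name]
--     while out and out[0] == '_':
--         out.pop(0)
--     while out and out[-1] == '_':
--         out.pop()
--     return ''.join(out) if out else "default"
-- ===== Notes on version B (the rewrite author's own statement) =====
-- stated objective: idiomatic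
-- what changed: Replaces the five sequential whole-string str.replace passes with one pass that maps each character through a set-membership test, and replaces strip('_') with explicit pop loops trimming both ends.
import Mathlib
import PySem

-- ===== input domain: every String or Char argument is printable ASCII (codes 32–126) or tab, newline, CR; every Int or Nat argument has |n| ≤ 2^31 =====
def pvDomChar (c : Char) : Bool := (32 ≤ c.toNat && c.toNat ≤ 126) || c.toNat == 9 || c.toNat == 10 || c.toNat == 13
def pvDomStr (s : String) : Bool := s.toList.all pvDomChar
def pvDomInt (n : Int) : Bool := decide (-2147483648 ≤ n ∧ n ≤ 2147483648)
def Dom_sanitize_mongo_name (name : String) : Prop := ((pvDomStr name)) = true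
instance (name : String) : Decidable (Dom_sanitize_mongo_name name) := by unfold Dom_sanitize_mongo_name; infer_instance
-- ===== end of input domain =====

-- B replaces A's five whole-string replace passes by one per-character pass over a set
-- of invalid characters, and strip('_') by explicit trim loops (idiomatic, not faster).

-- ===== PORT A =====
def sanitize_mongo_name (name : String) : String :=
  if name.isEmpty then name
  else
    -- invalid_chars = ['.', ' ', '/', '\\', '\x00']; for char in invalid_chars: sanitized = sanitized.replace(char, '_')
    let invalid_chars : List String := [".", " ", "/", "\\", "\u0000"]
    let sanitized := invalid_chars.foldl (fun s ch => PySem.Str.replace s ch "_") name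
    let sanitized := PySem.Str.stripChars sanitized "_"
    if sanitized.isEmpty then "default" else sanitized

-- ===== PORT B =====
-- the frozenset of invalid characters (distinct elements, membership test)
def pvInvalidChars : List Char := ['.', ' ', '/', '\\', '\u0000']

def sanitize_mongo_name_alt (name : String) : String :=
  if name.isEmpty then name
  else
    let out := name.toList.map (fun c => if pvInvalidChars.contains c then '_' else c)
    -- while out and out[0] == '_': out.pop(0)
    let out := out.dropWhile (fun c => c == '_')
    -- while out and out[-1] == '_': out.pop()   (trim from the back)
    let out := (out.reverse.dropWhile (fun c => c == '_')).reverse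
    if out.isEmpty then "default" else String.ofList out

-- ===== PRECONDITION & SPEC =====
def Spec_sanitize_mongo_name (name : String) (out : String) : Prop := out = sanitize_mongo_name_alt name
instance (name : String) (out : String) : Decidable (Spec_sanitize_mongo_name name out) := by unfold Spec_sanitize_mongo_name; infer_instance

-- ===== CLAIM (what is proved, stated in full; the proofs are below) =====
def Claim_equal_sanitize_mongo_name : Prop := ∀ (name : String), Dom_sanitize_mongo_name name → Spec_sanitize_mongo_name name (sanitize_mongo_name name)

-- ===== LEMMAS AND PROOFS =====

-- replacing a single character by a single character is a map
theorem replace_go_single (o n : Char) (fuel : Nat) (l acc : List Char) (h : l.length ≤ fuel) :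
    PySem.Chars.replace.go [o] [n] fuel l acc
      = acc.reverse ++ l.map (fun c => if c == o then n else c) := by
  induction fuel generalizing l acc with
  | zero =>
    interval_cases hl : l.length
    · simp_all [PySem.Chars.replace.go, List.length_eq_zero_iff.mp hl]
  | succ fuel ih =>
    cases l with
    | nil => simp [PySem.Chars.replace.go]
    | cons c t =>
      simp only [PySem.Chars.replace.go]
      by_cases hc : c = o
      · subst hc
        simp only [List.isPrefixOf, BEq.rfl, Bool.true_and, if_pos]
        rw [ih _ _ (by simpa using Nat.le_of_succ_le_succ h)]
        simp
      · have : [o].isPrefixOf (c :: t) = false := by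
          simp [List.isPrefixOf]; exact fun h' => absurd h'.symm hc
        rw [this]
        simp only [Bool.false_eq_true, if_false]
        rw [ih _ _ (by simpa using Nat.le_of_succ_le_succ h)]
        simp [hc]

theorem replace_single (s : List Char) (o n : Char) :
    PySem.Chars.replace s [o] [n] = s.map (fun c => if c == o then n else c) := by
  rw [PySem.Chars.replace]
  simp only [List.isEmpty_cons, Bool.false_eq_true, if_false]
  exact replace_go_single o n s.length s [] (le_refl _)

theorem toList_ofList (l : List Char) : (String.ofList l).toList = l :=
  Eq.symm (String.ofList_eq.mp rfl)

theorem isEmpty_iff_toList (s : String) : s.isEmpty = s.toList.isEmpty := by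
  rw [Bool.eq_iff_iff, String.isEmpty_iff, List.isEmpty_iff, ← String.toList_inj]
  simp

theorem contains_underscore_eq :
    (fun c => ("_" : String).toList.contains c) = (fun c : Char => c == '_') := by
  funext c
  by_cases h : c = '_' <;> simp [h, show ("_" : String).toList = ['_'] from by decide]

theorem sanitize_eq (name : String) (hne : name.isEmpty = false) :
    sanitize_mongo_name name = sanitize_mongo_name_alt name := by
  unfold sanitize_mongo_name sanitize_mongo_name_alt
  rw [hne]
  simp only [Bool.false_eq_true, if_false, List.foldl]
  set f : Char → Char := fun c => if pvInvalidChars.contains c then '_' else c with hf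
  set B : List Char := ((name.toList.map f).dropWhile (fun c => c == '_')).reverse.dropWhile
      (fun c => c == '_') |>.reverse with hB
  have hmap : (PySem.Str.replace (PySem.Str.replace (PySem.Str.replace (PySem.Str.replace
      (PySem.Str.replace name "." "_") " " "_") "/" "_") "\\" "_") "\u0000" "_").toList
        = name.toList.map f := by
    simp only [PySem.Str.toList_replace,
      show ("." : String).toList = ['.'] from by decide,
      show (" " : String).toList = [' '] from by decide,
      show ("/" : String).toList = ['/'] from by decide,
      show ("\\" : String).toList = ['\\'] from by decide,
      show ("\u0000" : String).toList = ['\u0000'] from by decide,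
      show ("_" : String).toList = ['_'] from by decide]
    rw [replace_single, replace_single, replace_single, replace_single, replace_single]
    simp only [List.map_map]
    apply List.map_congr_left
    intro c _
    simp only [Function.comp, hf, pvInvalidChars, List.contains_cons, List.contains_nil,
      Bool.or_false]
    by_cases h1 : c = '.' <;> by_cases h2 : c = ' ' <;> by_cases h3 : c = '/' <;>
      by_cases h4 : c = '\\' <;> by_cases h5 : c = '\u0000' <;> simp_all
  have hstrip : (PySem.Str.stripChars (PySem.Str.replace (PySem.Str.replace (PySem.Str.replace
      (PySem.Str.replace (PySem.Str.replace name "." "_") " " "_") "/" "_") "\\" "_")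
      "\u0000" "_") "_").toList = B := by
    rw [PySem.Str.toList_stripChars, PySem.Chars.stripChars, hmap, hB]
    rw [contains_underscore_eq]
  have hemp : (PySem.Str.stripChars (PySem.Str.replace (PySem.Str.replace (PySem.Str.replace
      (PySem.Str.replace (PySem.Str.replace name "." "_") " " "_") "/" "_") "\\" "_")
      "\u0000" "_") "_").isEmpty = B.isEmpty := by
    rw [isEmpty_iff_toList, hstrip]
  rw [hemp]
  split
  · rfl
  · exact String.toList_inj.mp (by rw [hstrip, toList_ofList])

-- ===== VERDICT (by name: the statement is the Claim_ definition above) =====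
theorem sanitize_mongo_name_spec : Claim_equal_sanitize_mongo_name := by
  intro name _
  unfold Spec_sanitize_mongo_name
  cases h : name.isEmpty
  · exact (sanitize_eq name h).symm ▸ rfl
  · simp [sanitize_mongo_name, sanitize_mongo_name_alt, h]
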